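-- pv_equiv track=rewrite | github.com/satheeshsimha/navic-1 | L1/codes/e2e_sim/navicsimL1.py | find_sync_word
-- ===== SOURCE A (Python) =====
-- SYNC_WORD = [1, 1, 1, 0, 1, 0, 1, 1, 1, 0, 0, 1, 0, 0, 0, 0]  # Sync word value
--
-- INV_SYNC_WORD = [0, 0, 0, 1, 0, 1, 0, 0, 0, 1, 1, 0, 1, 1, 1, 1] # Inverted Sync word value (to check in case of inverted bits)
--
-- def find_sync_word(data):
--     """Frame synchronization for IRNSS receiver
--
--     :param list data: samples from tracking loop
--     :returns int status: indicator for presence of sync word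
--     :returns int fsync_index: returns the frame starting index
--
--     """
--     sync_word_length = len(SYNC_WORD)
--     window = []
--     fsync_index = -1
--     status = 0
--
--     for index, bit in enumerate(data):
--         window.append(bit)
--         if len(window) > sync_word_length:
--             window.pop(0)
--         if window == SYNC_WORD:
--             status = 1
--             fsync_index = index - sync_word_length + 1
--             break
--         elif window == INV_SYNC_WORD:
--             status = -1
--             fsync_index = index - sync_word_length + 1
--             break
--
--     return status, fsync_index
-- ===== SOURCE B (Python) =====
-- SYNC_WORD = [1, 1, 1, 0, 1, 0, 1, 1, 1, 0, 0, 1, 0, 0, 0, 0]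
--
-- INV_SYNC_WORD = [0, 0, 0, 1, 0, 1, 0, 0, 0, 1, 1, 0, 1, 1, 1, 1]
--
-- def find_sync_word(data):
--     d = list(data)
--     for i in range(len(d) - 15):
--         w = d[i:i + 16]
--         if w == SYNC_WORD:
--             return 1, i
--         if w == INV_SYNC_WORD:
--             return -1, i
--     return 0, -1
-- ===== Notes on version B (the rewrite author's own statement) =====
-- stated objective: simpler
-- what changed: Replaced the incrementally maintained sliding window (append + pop(0) bookkeeping with an enumerate loop, status/index variables and a break) by a direct scan over start offsets comparing the fixed slice d[i:i+16] against the two patterns, returning immediately on a match.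
import Mathlib
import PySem

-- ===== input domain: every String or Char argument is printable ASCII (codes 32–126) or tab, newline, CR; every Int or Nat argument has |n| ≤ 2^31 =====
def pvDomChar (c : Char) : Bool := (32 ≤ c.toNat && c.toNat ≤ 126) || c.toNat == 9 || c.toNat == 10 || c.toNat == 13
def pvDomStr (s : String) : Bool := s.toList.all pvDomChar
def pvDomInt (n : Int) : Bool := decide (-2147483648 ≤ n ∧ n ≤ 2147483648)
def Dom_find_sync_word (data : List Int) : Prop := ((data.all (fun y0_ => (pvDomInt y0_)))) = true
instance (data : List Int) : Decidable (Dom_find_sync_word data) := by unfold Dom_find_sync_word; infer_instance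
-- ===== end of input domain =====

-- B replaces A's incrementally maintained sliding-window list (append/pop(0)) by a direct
-- scan over start offsets comparing the slice d[i:i+16] to the two patterns (objective: simpler).


def SYNC_WORD : List Int := [1, 1, 1, 0, 1, 0, 1, 1, 1, 0, 0, 1, 0, 0, 0, 0]
def INV_SYNC_WORD : List Int := [0, 0, 0, 1, 0, 1, 0, 0, 0, 1, 1, 0, 1, 1, 1, 1]

-- ===== PORT A =====
-- the for-loop of A: state = (index of current bit, window); break = early return
def findA_loop (rest : List Int) (idx : Int) (window : List Int) : Int × Int :=
  match rest with
  | [] => (0, -1)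
  | bit :: rest' =>
    let w0 := window ++ [bit]
    let w := if w0.length > SYNC_WORD.length then w0.drop 1 else w0   -- window.pop(0)
    if w = SYNC_WORD then (1, idx - (SYNC_WORD.length : Int) + 1)
    else if w = INV_SYNC_WORD then (-1, idx - (SYNC_WORD.length : Int) + 1)
    else findA_loop rest' (idx + 1) w

def find_sync_word (data : List Int) : Int × Int :=
  findA_loop data 0 []

-- ===== PORT B =====
-- the for-i-in-range loop of B: fuel = number of remaining offsets (len(d) - 15 - i)
def findB_loop (d : List Int) (i : Nat) (fuel : Nat) : Int × Int :=
  match fuel with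
  | 0 => (0, -1)
  | fuel' + 1 =>
    let w := PySem.List.slice d (some (i : Int)) (some ((i : Int) + 16))   -- d[i:i+16]
    if w = SYNC_WORD then (1, (i : Int))
    else if w = INV_SYNC_WORD then (-1, (i : Int))
    else findB_loop d (i + 1) fuel'

def find_sync_word_alt (data : List Int) : Int × Int :=
  findB_loop data 0 (data.length - 15)

-- ===== PRECONDITION & SPEC =====
def Spec_find_sync_word (data : List Int) (out : Int × Int) : Prop := out = find_sync_word_alt data
instance (data : List Int) (out : Int × Int) : Decidable (Spec_find_sync_word data out) := by unfold Spec_find_sync_word; infer_instance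

-- ===== CLAIM (what is proved, stated in full; the proofs are below) =====
def Claim_equal_find_sync_word : Prop := ∀ (data : List Int), Dom_find_sync_word data → Spec_find_sync_word data (find_sync_word data)

-- ===== LEMMAS AND PROOFS =====

-- common reference: first start position (counting from `i`) whose 16-window matches
def specF (s : List Int) (i : Int) : Int × Int :=
  match s with
  | [] => (0, -1)
  | _ :: rest =>
    if s.take 16 = SYNC_WORD then (1, i)
    else if s.take 16 = INV_SYNC_WORD then (-1, i)
    else specF rest (i + 1)

theorem specF_ne (s : List Int) (i : Int) (h : s ≠ []) :
    specF s i = if s.take 16 = SYNC_WORD then (1, i)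
      else if s.take 16 = INV_SYNC_WORD then (-1, i)
      else specF (s.drop 1) (i + 1) := by
  cases s with
  | nil => exact absurd rfl h
  | cons a t => simp only [specF, List.drop_succ_cons, List.drop_zero]

theorem ne_sync_of_length {l : List Int} (h : l.length ≠ 16) : l ≠ SYNC_WORD ∧ l ≠ INV_SYNC_WORD := by
  constructor <;> (intro he; exact h (by rw [he]; rfl))

theorem specF_short (s : List Int) : s.length < 16 → ∀ (i : Int), specF s i = (0, -1) := by
  induction s with
  | nil => intro _ _; rfl
  | cons b rest ih =>
    intro h i
    have hlt : (List.take 16 (b :: rest)).length ≠ 16 := by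
      simp only [List.length_take, List.length_cons]
      simp only [List.length_cons] at h
      omega
    obtain ⟨h1, h2⟩ := ne_sync_of_length hlt
    rw [specF_ne _ _ (by simp), if_neg h1, if_neg h2]
    simp only [List.drop_succ_cons, List.drop_zero]
    exact ih (by simp only [List.length_cons] at h; omega) _

theorem findA_full (rest window : List Int) (idx : Int) (hw : window.length = 16) :
    findA_loop rest idx window = specF ((window ++ rest).drop 1) (idx - 15) := by
  induction rest generalizing window idx with
  | nil =>
    simp only [findA_loop, List.append_nil]
    exact (specF_short (List.drop 1 window) (by simp only [List.length_drop, hw]; omega) (idx - 15)).symm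
  | cons bit rest' ih =>
    simp only [findA_loop]
    have hlen : (window ++ [bit]).length > SYNC_WORD.length := by
      simp [hw]; decide
    rw [if_pos hlen]
    have hwin : (window ++ [bit]).drop 1 = window.drop 1 ++ [bit] :=
      List.drop_append_of_le_length (by omega)
    have hs : (window ++ bit :: rest').drop 1 = window.drop 1 ++ bit :: rest' :=
      List.drop_append_of_le_length (by omega)
    have hdl : (window.drop 1).length = 15 := by simp [hw]
    have htake : (window.drop 1 ++ bit :: rest').take 16 = window.drop 1 ++ [bit] := by
      rw [List.take_append, hdl, List.take_of_length_le (by omega)]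
      rfl
    have slen : ((SYNC_WORD.length : Nat) : Int) = 16 := rfl
    rw [hs, specF_ne _ _ (by simp), htake, hwin, slen]
    split_ifs with h1 h2
    · simp only [Prod.mk.injEq]
      exact ⟨trivial, by omega⟩
    · simp only [Prod.mk.injEq]
      exact ⟨trivial, by omega⟩
    · rw [ih (window.drop 1 ++ [bit]) (idx + 1) (by simp; omega)]
      have hl : (window.drop 1 ++ [bit]) ++ rest' = window.drop 1 ++ bit :: rest' := by simp
      rw [hl]
      congr 1
      omega

theorem findA_grow (rest window : List Int) (idx : Int) (hw : window.length < 16) :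
    findA_loop rest idx window = specF (window ++ rest) (idx - window.length) := by
  induction rest generalizing window idx with
  | nil =>
    simp only [findA_loop, List.append_nil]
    exact (specF_short window hw (idx - window.length)).symm
  | cons bit rest' ih =>
    simp only [findA_loop]
    have hlen : ¬ (window ++ [bit]).length > SYNC_WORD.length := by
      simp [SYNC_WORD]; omega
    rw [if_neg hlen]
    have slen : ((SYNC_WORD.length : Nat) : Int) = 16 := rfl
    rw [slen]
    by_cases hfull : window.length = 15
    · have h16 : (window ++ [bit]).length = 16 := by simp [hfull]
      have htake : (window ++ bit :: rest').take 16 = window ++ [bit] := by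
        rw [show window ++ bit :: rest' = (window ++ [bit]) ++ rest' by simp,
          List.take_append, List.take_of_length_le (by omega), h16]
        simp
      rw [specF_ne _ _ (by simp), htake]
      split_ifs with h1 h2
      · simp only [Prod.mk.injEq, hfull]
        exact ⟨trivial, by push_cast; omega⟩
      · simp only [Prod.mk.injEq, hfull]
        exact ⟨trivial, by push_cast; omega⟩
      · rw [findA_full rest' (window ++ [bit]) (idx + 1) h16]
        have hl : (window ++ [bit]) ++ rest' = window ++ bit :: rest' := by simp
        rw [hl]
        congr 1
        rw [hfull]
        omega
    · have hshort : (window ++ [bit]).length < 16 := by simp; omega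
      obtain ⟨h1, h2⟩ := ne_sync_of_length (l := window ++ [bit]) (by omega)
      rw [if_neg h1, if_neg h2, ih (window ++ [bit]) (idx + 1) hshort]
      rw [show (window ++ [bit]) ++ rest' = window ++ bit :: rest' by simp]
      congr 1
      simp only [List.length_append, List.length_cons, List.length_nil]
      push_cast
      omega

theorem findB_spec (d : List Int) (fuel : Nat) : ∀ (i : Nat), fuel = d.length - (15 + i) →
    findB_loop d i fuel = specF (d.drop i) (i : Int) := by
  induction fuel with
  | zero =>
    intro i h
    simp only [findB_loop]
    exact (specF_short (d.drop i) (by simp only [List.length_drop]; omega) (i : Int)).symm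
  | succ fuel' ih =>
    intro i h
    simp only [findB_loop]
    have hslice : PySem.List.slice d (some (i : Int)) (some ((i : Int) + 16)) = (d.drop i).take 16 := by
      have := PySem.List.slice_natCast_add (xs := d) (j := i) (n := 16)
      simpa using this
    have hne : d.drop i ≠ [] := by
      intro he
      have := congrArg List.length he
      simp only [List.length_drop, List.length_nil] at this
      omega
    rw [hslice, specF_ne _ _ hne]
    split_ifs with h1 h2
    · rfl
    · rfl
    · rw [ih (i + 1) (by omega), List.drop_drop]
      congr 1

-- ===== VERDICT (by name: the statement is the Claim_ definition above) =====
theorem find_sync_word_spec : Claim_equal_find_sync_word := by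
  intro data _
  unfold Spec_find_sync_word find_sync_word find_sync_word_alt
  rw [findA_grow data [] 0 (by simp), findB_spec data (data.length - 15) 0 (by omega)]
  simp
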